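-- pv_equiv track=rewrite | github.com/anonymconference-star/Bagging_for_LID_Estimation | Bagging_for_LID/experiment_class.py | expand_param_dict_zipped
-- ===== SOURCE A (Python) =====
-- from collections.abc import Iterable
--
-- def expand_param_dict_zipped(param_dict):
--     def is_seq(v):
--         if isinstance(v, (str, bytes, dict)):
--             return False
--         return isinstance(v, Iterable)
--     def to_list(v):
--         return list(v) if is_seq(v) else [v]
--
--     keys = list(param_dict)
--     vals = [to_list(param_dict[k]) for k in keys]
--
--     lengths = [len(v) for v in vals]
--     n = max(lengths)
--
--     bad = [(k, len(v)) for k, v in zip(keys, vals) if len(v) not in (1, n)]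
--     if bad:
--         msg = ", ".join([f"{k} has length {L}" for k, L in bad])
--         raise ValueError(f"Zipped expansion needs all list-like params to have same length. {msg}. Expected 1 or {n}.")
--
--     out = []
--     for i in range(n):
--         d = {}
--         for k, v in zip(keys, vals):
--             d[k] = v[i] if len(v) == n else v[0]
--         out.append(d)
--
--     return out
-- ===== SOURCE B (Python) =====
-- from collections.abc import Iterable
--
-- def expand_param_dict_zipped(param_dict):
--     def is_seq(v):
--         if isinstance(v, (str, bytes, dict)):
--             return False
--         return isinstance(v, Iterable)
--     def to_list(v):
--         return list(v) if is_seq(v) else [v]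
--
--     keys = list(param_dict)
--     vals = [to_list(param_dict[k]) for k in keys]
--     n = max(len(v) for v in vals)
--     bad = [(k, len(v)) for k, v in zip(keys, vals) if len(v) not in (1, n)]
--     if bad:
--         msg = ", ".join([f"{k} has length {L}" for k, L in bad])
--         raise ValueError(f"Zipped expansion needs all list-like params to have same length. {msg}. Expected 1 or {n}.")
--
--     # Column-wise assembly: maintain all n partial rows at once and extend every
--     # row with one column per key (zipping a full-length column onto the rows,
--     # or appending the scalar v[0] to each). No row index, no per-cell branch.
--     rows = [[] for _ in range(n)]
--     for k, v in zip(keys, vals):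
--         if len(v) == n:
--             for r, x in zip(rows, v):
--                 r.append((k, x))
--         else:
--             x = v[0]
--             for r in rows:
--                 r.append((k, x))
--     return [dict(r) for r in rows]
-- ===== Notes on version B (the rewrite author's own statement) =====
-- stated objective: alternative
-- what changed: B inverts A's assembly: instead of A's outer loop over row indices that builds each dict with a per-cell 'v[i] if len(v)==n else v[0]' branch, B maintains all n partial rows at once and extends them column-by-column per key (zipping a full-length column onto the rows, or appending the scalar v[0] to every row), so assembly uses no row index and no per-cell branch.
-- outside the precondition, e.g. on expand_param_dict_zipped({}): A raises ValueError, B raises ValueError; on expand_param_dict_zipped({'a': [1, 2], 'b': [3, 4, 5]}): A raises ValueError, B raises ValueError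
import Mathlib
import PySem

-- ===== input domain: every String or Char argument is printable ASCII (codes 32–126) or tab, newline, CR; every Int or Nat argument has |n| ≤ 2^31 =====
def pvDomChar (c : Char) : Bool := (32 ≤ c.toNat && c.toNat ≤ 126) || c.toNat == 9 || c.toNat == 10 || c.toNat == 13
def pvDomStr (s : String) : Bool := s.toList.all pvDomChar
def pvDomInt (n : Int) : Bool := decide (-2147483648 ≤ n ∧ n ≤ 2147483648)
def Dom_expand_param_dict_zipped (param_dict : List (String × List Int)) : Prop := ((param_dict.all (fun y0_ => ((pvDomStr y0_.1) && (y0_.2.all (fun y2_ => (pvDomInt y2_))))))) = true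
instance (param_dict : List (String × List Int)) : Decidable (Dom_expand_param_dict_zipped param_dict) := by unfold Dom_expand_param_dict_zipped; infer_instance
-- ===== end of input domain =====

-- B (alternative): recursion over the keys extending all n partial rows one column
-- at a time, instead of A's row-index loop with a per-cell length branch; same cost.


-- ===== PORT A =====
-- the Python dict the List (String × List Int) argument denotes (insertion order, last value wins)
def pyDictOf (param_dict : List (String × List Int)) : PySem.Dict String (List Int) :=
  param_dict.foldl (fun d p => d.insert p.1 p.2) PySem.Dict.empty

-- values are always list[int] here, so is_seq is True and to_list is the identity
def expand_param_dict_zipped (param_dict : List (String × List Int)) : List (List (String × Int)) :=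
  let d := pyDictOf param_dict
  let keys := d.keys
  let vals := keys.map (fun k => d.getD k [])          -- param_dict[k]; k ∈ keys, so no KeyError
  let lengths := vals.map List.length
  let n := (PySem.List.max? lengths (fun x => x)).getD 0   -- max(lengths); ValueError on empty dict, excluded by Pre_
  let bad := (keys.zip vals).filter (fun p => !(p.2.length == 1 || p.2.length == n))
  if bad.isEmpty then
    (List.range n).foldl (fun out i =>
      out ++ [ ((keys.zip vals).foldl
          (fun (dd : PySem.Dict String Int) p =>
            dd.insert p.1 (if p.2.length = n then p.2.getD i 0 else p.2.getD 0 0))  -- v[i]/v[0]: index provably in range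
          PySem.Dict.empty).items ]) []
  else []                                              -- raise ValueError, excluded by Pre_

-- ===== PORT B =====
-- column-wise assembly: fold over the keys, extending all n partial rows with one
-- column per step ([] seeds rows; r.append((k, x)) becomes r ++ [(k, x)])
def pvBuild (n : Nat) (pairs : List (String × List Int)) : List (List (String × Int)) :=
  pairs.foldl (fun rows p =>
    if p.2.length = n then (rows.zip p.2).map (fun q => q.1 ++ [(p.1, q.2)])
    else rows.map (fun r => r ++ [(p.1, p.2.getD 0 0)]))   -- v[0]; nonempty under Pre_
    ((List.range n).map (fun _ => []))

def expand_param_dict_zipped_alt (param_dict : List (String × List Int)) : List (List (String × Int)) :=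
  let d := pyDictOf param_dict
  let keys := d.keys
  let vals := keys.map (fun k => d.getD k [])
  let n := (PySem.List.max? (vals.map List.length) (fun x => x)).getD 0
  let bad := (keys.zip vals).filter (fun p => !(p.2.length == 1 || p.2.length == n))
  if bad.isEmpty then
    (pvBuild n (keys.zip vals)).map
      (fun r => (r.foldl (fun (dd : PySem.Dict String Int) p => dd.insert p.1 p.2)
                  PySem.Dict.empty).items)              -- dict(r)
  else []

-- ===== PRECONDITION & SPEC =====
-- A raises exactly on the empty dict (max of an empty sequence) and when some value's
-- length is neither 1 nor the maximal length; Pre_ excludes exactly those inputs.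
def Pre_expand_param_dict_zipped (param_dict : List (String × List Int)) : Prop :=
  param_dict ≠ [] ∧
  ∀ p ∈ (pyDictOf param_dict).items,
    p.2.length = 1 ∨
    p.2.length = ((pyDictOf param_dict).items.map (fun q => q.2.length)).foldr max 0
instance (param_dict : List (String × List Int)) : Decidable (Pre_expand_param_dict_zipped param_dict) := by unfold Pre_expand_param_dict_zipped; infer_instance

def pvWitness_expand_param_dict_zipped : (List (String × List Int)) := [("a", [1, 2]), ("b", [5])]

def Spec_expand_param_dict_zipped (param_dict : List (String × List Int)) (out : List (List (String × Int))) : Prop := out = expand_param_dict_zipped_alt param_dict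
instance (param_dict : List (String × List Int)) (out : List (List (String × Int))) : Decidable (Spec_expand_param_dict_zipped param_dict out) := by unfold Spec_expand_param_dict_zipped; infer_instance

-- ===== CLAIM (what is proved, stated in full; the proofs are below) =====
def Claim_equal_expand_param_dict_zipped : Prop := ∀ (param_dict : List (String × List Int)), Dom_expand_param_dict_zipped param_dict → Pre_expand_param_dict_zipped param_dict → Spec_expand_param_dict_zipped param_dict (expand_param_dict_zipped param_dict)

-- ===== LEMMAS AND PROOFS =====

-- the value A writes at key p.1 in row i
def pvW (n i : Nat) (v : List Int) : Int := if v.length = n then v.getD i 0 else v.getD 0 0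

theorem pv_keys_nodup (pd : List (String × List Int)) : (pyDictOf pd).keys.Nodup := by
  exact PySem.Dict.nodup_keys_foldl_insert_key pd Prod.fst (fun d p => p.2) PySem.Dict.empty
    (by simp)

theorem pv_keys_ne (pd : List (String × List Int)) (h : pd ≠ []) : (pyDictOf pd).keys ≠ [] := by
  have hk := PySem.Dict.keys_foldl_insert_key (l := pd) (key := Prod.fst)
    (f := fun d (p : String × List Int) => p.2) (d := PySem.Dict.empty)
  have hk' : (pyDictOf pd).keys = PySem.Set.ofList (pd.map Prod.fst) := by
    simpa [pyDictOf, PySem.Dict.keys_empty, PySem.Set.update_nil_left] using hk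
  cases pd with
  | nil => exact absurd rfl h
  | cons q r =>
    have : q.1 ∈ (pyDictOf (q :: r)).keys := by
      rw [hk']
      exact (PySem.Set.mem_ofList _ _).2 (by simp)
    exact List.ne_nil_of_mem this

theorem pv_natfold (t : List Nat) (x : Nat) : t.foldl max x = max x (t.foldr max 0) := by
  induction t generalizing x with
  | nil => simp
  | cons a t ih => simp [ih]

theorem pv_zip_self_map {α β : Type} (l : List α) (f : α → β) :
    l.zip (l.map f) = l.map (fun x => (x, f x)) := by
  induction l with
  | nil => simp
  | cons a t ih => simp [ih]

theorem pv_dictify_eq (r : List (String × Int)) (h : (r.map Prod.fst).Nodup) :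
    (r.foldl (fun (dd : PySem.Dict String Int) p => dd.insert p.1 p.2)
      PySem.Dict.empty).items = r := by
  have hrow := PySem.Dict.items_foldl_insert_fresh
    (l := r) (k := fun p : String × Int => p.1) (v := fun p : String × Int => p.2)
    (d := (PySem.Dict.empty : PySem.Dict String Int))
    (by intro a _; exact PySem.Dict.contains_empty _) h
  beta_reduce at hrow
  rw [hrow]
  simp [PySem.Dict.empty]

-- loop invariant: the fold extends each of the n partial rows by one cell per key
theorem pvBuild_go (n : Nat) (pairs : List (String × List Int))
    (h : ∀ p ∈ pairs, p.2.length = 1 ∨ p.2.length = n) :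
    ∀ (F : Nat → List (String × Int)),
    pairs.foldl (fun rows p =>
      if p.2.length = n then (rows.zip p.2).map (fun q => q.1 ++ [(p.1, q.2)])
      else rows.map (fun r => r ++ [(p.1, p.2.getD 0 0)]))
      ((List.range n).map F)
    = (List.range n).map (fun i => F i ++ pairs.map (fun p => (p.1, pvW n i p.2))) := by
  induction pairs with
  | nil => intro F; simp
  | cons q tl ih =>
    intro F
    obtain ⟨k, v⟩ := q
    have htl : ∀ p ∈ tl, p.2.length = 1 ∨ p.2.length = n := fun p hp => h p (by simp [hp])
    rw [List.foldl_cons]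
    have hstep : (if v.length = n
          then (((List.range n).map F).zip v).map (fun q => q.1 ++ [(k, q.2)])
          else ((List.range n).map F).map (fun r => r ++ [(k, v.getD 0 0)]))
        = (List.range n).map (fun i => F i ++ [(k, pvW n i v)]) := by
      by_cases hvn : v.length = n
      · rw [if_pos hvn]
        apply List.ext_getElem
        · simp [hvn]
        · intro i h1 h2
          have hi : i < n := by simpa [hvn] using h1
          simp [List.getElem_zip, pvW, hvn, hi]
      · rw [if_neg hvn, List.map_map]
        apply List.map_congr_left
        intro i _
        simp [pvW, hvn]
    simp only [hstep]
    rw [ih htl]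
    apply List.map_congr_left
    intro i _
    simp

-- pvBuild computes the canonical table when every column length is 1 or n
theorem pvBuild_eq (n : Nat) (pairs : List (String × List Int))
    (h : ∀ p ∈ pairs, p.2.length = 1 ∨ p.2.length = n) :
    pvBuild n pairs = (List.range n).map
      (fun i => pairs.map (fun p => (p.1, pvW n i p.2))) := by
  unfold pvBuild
  simpa using pvBuild_go n pairs h (fun _ => [])

-- both ports, under Pre_, compute the same canonical table over the dict's items
theorem pv_portA_eq (pd : List (String × List Int)) (hpre : Pre_expand_param_dict_zipped pd) :
    expand_param_dict_zipped pd =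
      (List.range (((pyDictOf pd).items.map (fun q => q.2.length)).foldr max 0)).map
        (fun i => (pyDictOf pd).items.map
          (fun p => (p.1, pvW (((pyDictOf pd).items.map (fun q => q.2.length)).foldr max 0) i p.2))) := by
  obtain ⟨hne, hp⟩ := hpre
  have hnd : ((pyDictOf pd).items.map Prod.fst).Nodup := by
    simpa [PySem.Dict.keys] using pv_keys_nodup pd
  have hitems := PySem.Dict.items_eq_map_keys (pyDictOf pd) (pv_keys_nodup pd) ([] : List Int)
  have hvals : (pyDictOf pd).keys.map (fun k => (pyDictOf pd).getD k []) = (pyDictOf pd).items.map Prod.snd := by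
    conv_rhs => rw [hitems]
    rw [List.map_map]
    rfl
  have hzip : (pyDictOf pd).keys.zip ((pyDictOf pd).keys.map (fun k => (pyDictOf pd).getD k [])) = (pyDictOf pd).items := by
    rw [pv_zip_self_map]
    exact hitems.symm
  have hLne : (pyDictOf pd).items ≠ [] := by
    intro h0
    exact pv_keys_ne pd hne (by simp [PySem.Dict.keys, h0])
  have hmax : (PySem.List.max? (((pyDictOf pd).items.map Prod.snd).map List.length) (fun x => x)).getD 0
      = ((pyDictOf pd).items.map (fun q => q.2.length)).foldr max 0 := by
    rw [List.map_map]
    cases hL' : (pyDictOf pd).items.map (fun q => q.2.length) with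
    | nil => exact absurd (by simpa using hL') hLne
    | cons x t =>
      have hcast : (pyDictOf pd).items.map (List.length ∘ Prod.snd) = x :: t := by
        rw [← hL']; rfl
      rw [hcast, PySem.List.max?_id_cons]
      simp [pv_natfold]
  have hbadnil : (pyDictOf pd).items.filter
      (fun p => !(p.2.length == 1 || p.2.length == ((pyDictOf pd).items.map (fun q => q.2.length)).foldr max 0)) = [] := by
    apply List.filter_eq_nil_iff.2
    intro p hpL
    rcases hp p hpL with h | h <;> simp [h]
  simp only [expand_param_dict_zipped]
  simp only [hzip]
  simp only [hvals]
  simp only [hmax]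
  rw [if_pos (by rw [hbadnil]; rfl)]
  rw [PySem.List.foldl_append_singleton_eq_map, List.nil_append]
  apply List.map_congr_left
  intro i _
  have hrow := PySem.Dict.items_foldl_insert_fresh
    (l := (pyDictOf pd).items) (k := fun p : String × List Int => p.1)
    (v := fun p : String × List Int =>
      if p.2.length = ((pyDictOf pd).items.map (fun q => q.2.length)).foldr max 0
      then p.2.getD i 0 else p.2.getD 0 0)
    (d := (PySem.Dict.empty : PySem.Dict String Int))
    (by intro a _; exact PySem.Dict.contains_empty _) hnd
  beta_reduce at hrow
  rw [hrow]
  simp [pvW, PySem.Dict.empty]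

theorem pv_portB_eq (pd : List (String × List Int)) (hpre : Pre_expand_param_dict_zipped pd) :
    expand_param_dict_zipped_alt pd =
      (List.range (((pyDictOf pd).items.map (fun q => q.2.length)).foldr max 0)).map
        (fun i => (pyDictOf pd).items.map
          (fun p => (p.1, pvW (((pyDictOf pd).items.map (fun q => q.2.length)).foldr max 0) i p.2))) := by
  obtain ⟨hne, hp⟩ := hpre
  have hnd : ((pyDictOf pd).items.map Prod.fst).Nodup := by
    simpa [PySem.Dict.keys] using pv_keys_nodup pd
  have hitems := PySem.Dict.items_eq_map_keys (pyDictOf pd) (pv_keys_nodup pd) ([] : List Int)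
  have hvals : (pyDictOf pd).keys.map (fun k => (pyDictOf pd).getD k []) = (pyDictOf pd).items.map Prod.snd := by
    conv_rhs => rw [hitems]
    rw [List.map_map]
    rfl
  have hzip : (pyDictOf pd).keys.zip ((pyDictOf pd).keys.map (fun k => (pyDictOf pd).getD k [])) = (pyDictOf pd).items := by
    rw [pv_zip_self_map]
    exact hitems.symm
  have hLne : (pyDictOf pd).items ≠ [] := by
    intro h0
    exact pv_keys_ne pd hne (by simp [PySem.Dict.keys, h0])
  have hmax : (PySem.List.max? (((pyDictOf pd).items.map Prod.snd).map List.length) (fun x => x)).getD 0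
      = ((pyDictOf pd).items.map (fun q => q.2.length)).foldr max 0 := by
    rw [List.map_map]
    cases hL' : (pyDictOf pd).items.map (fun q => q.2.length) with
    | nil => exact absurd (by simpa using hL') hLne
    | cons x t =>
      have hcast : (pyDictOf pd).items.map (List.length ∘ Prod.snd) = x :: t := by
        rw [← hL']; rfl
      rw [hcast, PySem.List.max?_id_cons]
      simp [pv_natfold]
  have hbadnil : (pyDictOf pd).items.filter
      (fun p => !(p.2.length == 1 || p.2.length == ((pyDictOf pd).items.map (fun q => q.2.length)).foldr max 0)) = [] := by
    apply List.filter_eq_nil_iff.2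
    intro p hpL
    rcases hp p hpL with h | h <;> simp [h]
  simp only [expand_param_dict_zipped_alt]
  simp only [hzip]
  simp only [hvals]
  simp only [hmax]
  rw [if_pos (by rw [hbadnil]; rfl)]
  rw [pvBuild_eq _ _ hp]
  rw [List.map_map]
  apply List.map_congr_left
  intro i _
  simp only [Function.comp_apply]
  apply pv_dictify_eq
  rw [List.map_map]
  simpa using hnd

-- ===== VERDICT (by name: the statement is the Claim_ definition above) =====
theorem expand_param_dict_zipped_spec : Claim_equal_expand_param_dict_zipped := by
  intro pd hdom hpre
  unfold Spec_expand_param_dict_zipped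
  rw [pv_portA_eq pd hpre, pv_portB_eq pd hpre]
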